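-- pv_equiv track=rewrite | github.com/Chen-XiaoLei/Hooglle | logparser/parser/prefix_tree.py | Str2List
-- ===== SOURCE A (Python) =====
-- def Str2List(nodeStr):
--     StrList = []
--     index = 0
--     while (index < len(nodeStr)):
--         word_now = nodeStr[index]
--         if (word_now != '<'):
--             StrList.append(word_now)
--             index += 1
--         elif (nodeStr[index:index + 3] == "<*>"):
--             StrList.append("<*>")
--             index = index + 3
--         else:
--             StrList.append("<")
--             index += 1
--     return StrList
-- ===== SOURCE B (Python) =====
-- def Str2List(nodeStr):
--     parts = nodeStr.split("<*>")
--     result = []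
--     for i, part in enumerate(parts):
--         if i > 0:
--             result.append("<*>")
--         result.extend(part)
--     return result
-- ===== Notes on version B (the rewrite author's own statement) =====
-- stated objective: idiomatic
-- what changed: B replaces A's char-by-char while loop with manual index bookkeeping and slice tests by a single str.split("<*>") followed by one pass that interleaves the "<*>" token between the exploded parts; the per-character interpreter work moves into the built-in split, a constant-factor win.
import Mathlib
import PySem

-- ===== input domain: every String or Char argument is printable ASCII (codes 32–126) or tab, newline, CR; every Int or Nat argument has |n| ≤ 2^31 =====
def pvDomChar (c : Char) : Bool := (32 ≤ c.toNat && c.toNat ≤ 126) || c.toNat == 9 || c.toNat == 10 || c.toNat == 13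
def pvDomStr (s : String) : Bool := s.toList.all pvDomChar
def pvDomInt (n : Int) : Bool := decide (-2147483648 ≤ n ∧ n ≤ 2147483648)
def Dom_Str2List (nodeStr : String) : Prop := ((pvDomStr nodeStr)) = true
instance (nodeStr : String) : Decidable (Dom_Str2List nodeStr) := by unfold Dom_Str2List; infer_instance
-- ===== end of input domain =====

-- B splits the string on "<*>" once and reassembles (parts interleaved with the "<*>" token,
-- each part exploded into characters) instead of A's char-by-char index scan: simpler decomposition.


-- ===== PORT A =====
-- A's while loop over `index` scans the tail of the string; `nodeStr[index]` is the head of the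
-- remainder and the slice `nodeStr[index:index+3]` is `take 3` of the remainder (exact: 0 ≤ index
-- < len(nodeStr) throughout, and a Python slice is clamped at the end of the string).
def Str2List.go : List Char → List String
  | [] => []
  | c :: rest =>
    if c ≠ '<' then String.ofList [c] :: Str2List.go rest
    else if (c :: rest).take 3 = ['<', '*', '>'] then "<*>" :: Str2List.go (rest.drop 2)
    else "<" :: Str2List.go rest
termination_by l => l.length
decreasing_by all_goals (simp only [List.length_cons, List.length_drop]; omega)

def Str2List (nodeStr : String) : List String := Str2List.go nodeStr.toList

-- ===== PORT B =====
-- Source B: parts = nodeStr.split("<*>"); then one pass over enumerate(parts) appending "<*>"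
-- before every part but the first and extending with the part's characters.
def Str2List_alt (nodeStr : String) : List String :=
  let parts := PySem.Chars.splitOn nodeStr.toList "<*>".toList
  (PySem.List.enumerate parts).foldl
    (fun res ip =>
      (if ip.1 > 0 then res ++ ["<*>"] else res) ++ ip.2.map (fun c => String.ofList [c])) []

-- ===== PRECONDITION & SPEC =====
def Spec_Str2List (nodeStr : String) (out : List String) : Prop := out = Str2List_alt nodeStr
instance (nodeStr : String) (out : List String) : Decidable (Spec_Str2List nodeStr out) := by unfold Spec_Str2List; infer_instance

-- ===== CLAIM (what is proved, stated in full; the proofs are below) =====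
def Claim_equal_Str2List : Prop := ∀ (nodeStr : String), Dom_Str2List nodeStr → Spec_Str2List nodeStr (Str2List nodeStr)

-- ===== LEMMAS AND PROOFS =====

-- a direct (fuel-free) recursion computing what PySem.Chars.splitOn computes for sep = "<*>"
def pSplit : List Char → List Char → List (List Char)
  | cur, [] => [cur]
  | cur, c :: rest =>
    if ['<', '*', '>'].isPrefixOf (c :: rest) then cur :: pSplit [] (rest.drop 2)
    else pSplit (cur ++ [c]) rest
termination_by _ l => l.length
decreasing_by all_goals (simp only [List.length_cons, List.length_drop]; omega)

theorem prefix3 {l : List Char} (hp : List.isPrefixOf ['<', '*', '>'] l = true) :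
    ∃ r, l = '<' :: '*' :: '>' :: r := by
  obtain ⟨r, hr⟩ := List.isPrefixOf_iff_prefix.mp hp
  exact ⟨r, hr.symm⟩

theorem pSplit_pre (cur r : List Char) :
    pSplit cur ('<' :: '*' :: '>' :: r) = cur :: pSplit [] r := by
  rw [pSplit]; simp [List.isPrefixOf]

theorem pSplit_no (cur : List Char) (c : Char) (rest : List Char)
    (h : ¬ List.isPrefixOf ['<', '*', '>'] (c :: rest) = true) :
    pSplit cur (c :: rest) = pSplit (cur ++ [c]) rest := by
  rw [pSplit, if_neg h]

theorem pSplit_ne_nil (cur l : List Char) : pSplit cur l ≠ [] := by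
  induction cur, l using pSplit.induct with
  | case1 cur => rw [pSplit]; simp
  | case2 cur c rest hp ih =>
    obtain ⟨r, hr⟩ := prefix3 hp
    injection hr with h1 h2
    subst h1; subst h2
    rw [pSplit_pre]; simp
  | case3 cur c rest hp ih => rw [pSplit_no _ _ _ hp]; exact ih

theorem go_spec (fuel : Nat) (l cur : List Char) (acc : List (List Char))
    (h : l.length + 1 ≤ fuel) :
    PySem.Chars.splitOn.go ['<', '*', '>'] fuel l cur acc = acc.reverse ++ pSplit cur.reverse l := by
  induction fuel generalizing l cur acc with
  | zero => omega
  | succ fuel ih =>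
    rw [PySem.Chars.splitOn.go.eq_def]
    cases l with
    | nil => rw [pSplit]; simp
    | cons c rest =>
      simp only []
      by_cases hp : List.isPrefixOf ['<', '*', '>'] (c :: rest) = true
      · rw [if_pos hp]
        obtain ⟨r, hr⟩ := prefix3 hp
        injection hr with h1 h2
        subst h1; subst h2
        have hdrop : List.drop ((['<', '*', '>'] : List Char).length)
            ('<' :: '*' :: '>' :: r) = r := by simp
        have hlen : r.length + 1 ≤ fuel := by simp at h; omega
        rw [hdrop, ih _ _ _ hlen, pSplit_pre]
        simp
      · rw [if_neg hp]
        have hlen : rest.length + 1 ≤ fuel := by simp at h; omega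
        rw [ih _ _ _ hlen, pSplit_no _ _ _ hp]
        simp

theorem splitOn_eq_pSplit (s : List Char) :
    PySem.Chars.splitOn s ['<', '*', '>'] = pSplit [] s := by
  unfold PySem.Chars.splitOn
  rw [go_spec _ _ _ _ (by omega)]
  simp

-- how B reassembles a parts list
def glue : List (List Char) → List String
  | [] => []
  | p :: ps =>
    p.map (fun c => String.ofList [c]) ++
      ps.flatMap (fun q => "<*>" :: q.map (fun c => String.ofList [c]))

theorem glue_cons_cons (p q : List Char) (ps : List (List Char)) :
    glue (p :: q :: ps) = p.map (fun c => String.ofList [c]) ++ "<*>" :: glue (q :: ps) := by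
  simp [glue]

theorem glue_pSplit (cur l : List Char) :
    glue (pSplit cur l) = cur.map (fun c => String.ofList [c]) ++ Str2List.go l := by
  induction cur, l using pSplit.induct with
  | case1 cur => rw [pSplit]; simp [glue, Str2List.go]
  | case2 cur c rest hp ih =>
    obtain ⟨r, hr⟩ := prefix3 hp
    injection hr with h1 h2
    subst h1; subst h2
    rw [pSplit_pre]
    obtain ⟨q, ps, hq⟩ : ∃ q ps, pSplit [] (List.drop 2 ('*' :: '>' :: r)) = q :: ps := by
      cases hps : pSplit [] (List.drop 2 ('*' :: '>' :: r)) with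
      | nil => exact absurd hps (pSplit_ne_nil _ _)
      | cons q ps => exact ⟨q, ps, rfl⟩
    simp only [List.drop_succ_cons, List.drop_zero] at hq ih ⊢
    rw [hq, glue_cons_cons, ← hq, ih]
    conv_rhs => rw [Str2List.go]
    simp
  | case3 cur c rest hp ih =>
    rw [pSplit_no _ _ _ hp, ih]
    conv_rhs => rw [Str2List.go]
    by_cases hc : c = '<'
    · subst hc
      rw [if_neg (by simp)]
      rw [if_neg (fun htake => hp (List.isPrefixOf_iff_prefix.mpr
        (List.prefix_iff_eq_take.mpr htake.symm)))]
      simp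
    · rw [if_pos (by simpa using hc)]
      simp

theorem foldl_enum_pos (f : List String → Int × List Char → List String)
    (hf : f = fun res ip => (if ip.1 > 0 then res ++ ["<*>"] else res) ++
        ip.2.map (fun c => String.ofList [c]))
    (ps : List (List Char)) (n : Int) (hn : 0 < n) (res : List String) :
    (PySem.List.enumerate ps n).foldl f res =
      res ++ ps.flatMap (fun q => "<*>" :: q.map (fun c => String.ofList [c])) := by
  induction ps generalizing n res with
  | nil => simp [PySem.List.enumerate]
  | cons p ps ih =>
    simp only [PySem.List.enumerate, List.foldl_cons]
    rw [ih (n + 1) (by omega)]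
    subst hf
    simp [hn]

theorem alt_eq_glue (s : String) : Str2List_alt s = glue (pSplit [] s.toList) := by
  unfold Str2List_alt
  have hsep : ("<*>" : String).toList = ['<', '*', '>'] := rfl
  rw [hsep, splitOn_eq_pSplit]
  obtain ⟨q, ps, hq⟩ : ∃ q ps, pSplit [] s.toList = q :: ps := by
    cases hps : pSplit [] s.toList with
    | nil => exact absurd hps (pSplit_ne_nil _ _)
    | cons q ps => exact ⟨q, ps, rfl⟩
  rw [hq]
  simp only [PySem.List.enumerate, List.foldl_cons]
  rw [show (0 : Int) + 1 = 1 from rfl, foldl_enum_pos _ rfl ps 1 (by omega)]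
  simp [glue]

-- ===== VERDICT (by name: the statement is the Claim_ definition above) =====
theorem Str2List_spec : Claim_equal_Str2List := by
  intro s _
  unfold Spec_Str2List
  rw [alt_eq_glue]
  have := glue_pSplit [] s.toList
  simpa [Str2List] using this.symm
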